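-- pv_equiv track=rewrite | github.com/vjsingh1984/victor | victor/agent/response_sanitizer.py | _extract_function_def
-- ===== SOURCE A (Python) =====
-- from typing import TYPE_CHECKING, Any, Optional
--
-- def _extract_function_def(code: str) -> Optional[str]:
--     """Extract just the function definition from code."""
--     lines = code.split("\n")
--     func_lines = []
--     in_function = False
--     base_indent = 0
--
--     for line in lines:
--         stripped = line.lstrip()
--
--         if stripped.startswith("def "):
--             in_function = True
--             base_indent = len(line) - len(stripped)
--             func_lines.append(line[base_indent:])
--         elif in_function:
--             if line.strip() == "":
--                 func_lines.append("")
--             elif len(line) - len(line.lstrip()) > base_indent: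
--                 func_lines.append(line[base_indent:])
--             elif stripped.startswith(("def ", "class ", "@")):
--                 break
--             elif len(line) - len(line.lstrip()) <= base_indent and line.strip():
--                 break
--             else:
--                 func_lines.append(line[base_indent:] if len(line) > base_indent else "")
--
--     if func_lines:
--         return "\n".join(func_lines)
--     return None
-- ===== SOURCE B (Python) =====
-- from typing import Optional
--
--
-- def _extract_function_def(code: str) -> Optional[str]:
--     """Extract just the first function definition block from code."""
--     lines = code.split("\n")
--     starts = [(i, l) for i, l in enumerate(lines) if l.lstrip().startswith("def ")]
--     if not starts:
--         return None
--     s, d = starts[0]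
--     base = len(d) - len(d.lstrip())
--     stops = [j for j, l in enumerate(lines)
--              if j > s and l.strip() and len(l) - len(l.lstrip()) <= base]
--     e = stops[0] if stops else len(lines)
--     return "\n".join(l[base:] if l.strip() else "" for l in lines[s:e])
-- ===== Notes on version B (the rewrite author's own statement) =====
-- stated objective: alternative
-- what changed: Replaced A's flag-driven accumulator state machine (in_function/base_indent, append-or-break per line) by a declarative index computation: enumerate the lines, take the first def-header index s and the first dedent index e after it, and emit the mapped slice lines[s:e] - no flag, no accumulator, no break.
-- intended difference: On code where A's scan reaches a second def-header line after the first one (only blank or deeper-indented lines in between), A restarts collection there - concatenating later top-level functions and re-dedenting nested defs - while B returns just the first function block, which is what the docstring (extract the function definition) intends. — e.g. on _extract_function_def("def f():\ndef g():"): A returns some "def f():\ndef g():", B returns some "def f():"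
import Mathlib
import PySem

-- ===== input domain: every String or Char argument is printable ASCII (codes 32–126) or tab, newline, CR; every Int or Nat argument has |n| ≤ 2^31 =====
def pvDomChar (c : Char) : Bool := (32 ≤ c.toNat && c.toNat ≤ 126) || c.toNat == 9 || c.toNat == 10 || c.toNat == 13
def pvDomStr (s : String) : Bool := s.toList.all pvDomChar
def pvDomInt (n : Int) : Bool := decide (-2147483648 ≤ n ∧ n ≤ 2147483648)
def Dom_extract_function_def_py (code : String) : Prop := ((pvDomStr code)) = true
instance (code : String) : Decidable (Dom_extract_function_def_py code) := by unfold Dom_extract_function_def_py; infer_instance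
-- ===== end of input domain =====

-- B replaces A's flag-driven accumulator pass by a declarative index computation (first `def `
-- index, first dedent index after it, mapped slice in between); on code with a later reachable
-- `def ` line A wrongly restarts/dedents while B keeps/stops — see D_ below.

-- code.split("\n"): the separator is the non-empty literal "\n", so split? is always `some`
-- and `getD []` never takes its default
def pvLines (code : String) : List String := (PySem.Str.split? code "\n").getD []

-- ===== PORT A =====
-- the for-loop of A, state (in_function, base_indent, func_lines); `break` returns the accumulator
def pvLoopA : List String → Bool → Int → List String → List String
  | [], _, _, acc => acc
  | line :: rest, inf, base, acc =>
    let stripped := PySem.Str.lstrip line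
    if PySem.Str.startswith stripped "def " then
      let b := PySem.Str.len line - PySem.Str.len stripped
      pvLoopA rest true b (acc ++ [PySem.Str.slice line (some b) none])
    else if inf then
      if PySem.Str.strip line = "" then
        pvLoopA rest inf base (acc ++ [""])
      else if base < PySem.Str.len line - PySem.Str.len (PySem.Str.lstrip line) then
        pvLoopA rest inf base (acc ++ [PySem.Str.slice line (some base) none])
      else if PySem.Str.startswith stripped "def " || PySem.Str.startswith stripped "class " ||
              PySem.Str.startswith stripped "@" then
        acc
      else if PySem.Str.len line - PySem.Str.len (PySem.Str.lstrip line) ≤ base ∧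
              ¬ PySem.Str.strip line = "" then
        acc
      else
        pvLoopA rest inf base
          (acc ++ [if base < PySem.Str.len line then PySem.Str.slice line (some base) none else ""])
    else
      pvLoopA rest inf base acc

def extract_function_def_py (code : String) : Option String :=
  let func_lines := pvLoopA (pvLines code) false 0 []
  if func_lines = [] then none else some (PySem.Str.join "\n" func_lines)

-- ===== PORT B =====
-- the three per-line tests of Source B's comprehensions
def pvIsDefLine (l : String) : Bool := PySem.Str.startswith (PySem.Str.lstrip l) "def "
def pvIndentB (l : String) : Int := PySem.Str.len l - PySem.Str.len (PySem.Str.lstrip l)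
def pvStopLine (base : Int) (l : String) : Bool :=
  !(PySem.Str.strip l == "") && decide (pvIndentB l ≤ base)

-- Source B: starts/stops comprehensions over enumerate(lines), then the mapped slice lines[s:e]
def extract_function_def_py_alt (code : String) : Option String :=
  let lines := pvLines code
  let starts := (PySem.List.enumerate lines).filter (fun p => pvIsDefLine p.2)
  match starts with
  | [] => none
  | (s, d) :: _ =>
    let base := pvIndentB d
    let stops := ((PySem.List.enumerate lines).filter
        (fun p => decide (s < p.1) && pvStopLine base p.2)).map (·.1)
    let e : Int := match stops with | [] => (lines.length : Int) | j :: _ => j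
    some (PySem.Str.join "\n"
      ((PySem.List.slice lines (some s) (some e)).map
        (fun l => if PySem.Str.strip l == "" then "" else PySem.Str.slice l (some base) none)))

-- ===== PRECONDITION & SPEC =====
-- Inputs where, after the first `def ` line, a SECOND `def ` line follows with only blank or
-- deeper-indented lines in between: there A restarts collection at that line's indent — concatenating
-- later functions and re-dedenting nested ones — while B returns just the first function block, which
-- is what "extract just the function definition" intends.
def pvD : Option Int → List String → Bool
  | _, [] => false
  | b?, l :: r =>
    let n := PySem.Str.len l - PySem.Str.len (PySem.Str.lstrip l)
    if PySem.Str.startswith (PySem.Str.lstrip l) "def " then b?.isSome || pvD (some n) r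
    else
      match b? with
      | none => pvD none r
      | some b => (PySem.Str.strip l == "" || decide (b < n)) && pvD b? r

def D_extract_function_def_py (code : String) : Prop := pvD none (pvLines code) = true

instance (code : String) : Decidable (D_extract_function_def_py code) := by
  unfold D_extract_function_def_py; infer_instance

def Spec_extract_function_def_py (code : String) (out : Option String) : Prop :=
  ¬ D_extract_function_def_py code → out = extract_function_def_py_alt code
instance (code : String) (out : Option String) : Decidable (Spec_extract_function_def_py code out) := by
  unfold Spec_extract_function_def_py; infer_instance

def pvDiffWitness_extract_function_def_py : String := "def f():\ndef g():"
def pvDiffWitnessOut_extract_function_def_py : (Option String) × (Option String) :=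
  (some "def f():\ndef g():", some "def f():")

-- ===== CLAIM =====
def Claim_unchanged_extract_function_def_py : Prop :=
  ∀ (code : String), Dom_extract_function_def_py code →
    Spec_extract_function_def_py code (extract_function_def_py code)
def Claim_changed_extract_function_def_py : Prop :=
  Dom_extract_function_def_py (pvDiffWitness_extract_function_def_py) ∧
  D_extract_function_def_py (pvDiffWitness_extract_function_def_py) ∧
  extract_function_def_py (pvDiffWitness_extract_function_def_py) = pvDiffWitnessOut_extract_function_def_py.1 ∧
  extract_function_def_py_alt (pvDiffWitness_extract_function_def_py) = pvDiffWitnessOut_extract_function_def_py.2 ∧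
  pvDiffWitnessOut_extract_function_def_py.1 ≠ pvDiffWitnessOut_extract_function_def_py.2
def Claim_exact_extract_function_def_py : Prop :=
  ∀ (code : String), Dom_extract_function_def_py code → D_extract_function_def_py code →
    extract_function_def_py code ≠ extract_function_def_py_alt code

-- ===== LEMMAS AND PROOFS =====

-- proof-side characterisation of B: first `def ` line with the lines after it …
def pvFindDef : List String → Option (String × List String)
  | [] => none
  | l :: rest =>
    if PySem.Str.startswith (PySem.Str.lstrip l) "def " then some (l, rest) else pvFindDef rest

-- … and the bounded block below it: blank → "", indent ≤ base → stop, else dedent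
def pvCollectB (base : Int) : List String → List String
  | [] => []
  | l :: rest =>
    if PySem.Str.strip l = "" then "" :: pvCollectB base rest
    else if PySem.Str.len l - PySem.Str.len (PySem.Str.lstrip l) ≤ base then []
    else PySem.Str.slice l (some base) none :: pvCollectB base rest

def pvAltShape (lines : List String) : Option String :=
  match pvFindDef lines with
  | none => none
  | some (l, rest) =>
    some (PySem.Str.join "\n"
      (PySem.Str.slice l (some (PySem.Str.len l - PySem.Str.len (PySem.Str.lstrip l))) none ::
        pvCollectB (PySem.Str.len l - PySem.Str.len (PySem.Str.lstrip l)) rest))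

-- ==== bridge: B's index computation equals the pvFindDef/pvCollectB characterisation ====

theorem pvFindDef_none (lines : List String) (h : pvFindDef lines = none) :
    ∀ x ∈ lines, pvIsDefLine x = false := by
  induction lines with
  | nil => intro x hx; cases hx
  | cons l rest ih =>
    intro x hx
    rw [pvFindDef] at h
    by_cases hd : PySem.Str.startswith (PySem.Str.lstrip l) "def " = true
    · rw [if_pos hd] at h; cases h
    · rw [if_neg hd] at h
      rcases List.mem_cons.mp hx with heq | hx
      · subst heq; simpa [pvIsDefLine] using hd
      · exact ih h x hx

theorem pvFindDef_some (lines : List String) (l : String) (rest : List String)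
    (h : pvFindDef lines = some (l, rest)) :
    ∃ pre, lines = pre ++ l :: rest ∧ (∀ x ∈ pre, pvIsDefLine x = false) ∧
      pvIsDefLine l = true := by
  induction lines with
  | nil => cases h
  | cons y ys ih =>
    rw [pvFindDef] at h
    by_cases hd : PySem.Str.startswith (PySem.Str.lstrip y) "def " = true
    · rw [if_pos hd] at h
      injection h with h'
      injection h' with h1 h2
      subst h1; subst h2
      refine ⟨[], rfl, ?_, by simpa [pvIsDefLine] using hd⟩
      intro x hx; cases hx
    · rw [if_neg hd] at h
      obtain ⟨pre, hsplit, hpre, hl⟩ := ih h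
      exact ⟨y :: pre, by rw [hsplit]; rfl,
        by intro x hx
           rcases List.mem_cons.mp hx with heq | hx
           · subst heq; simpa [pvIsDefLine] using hd
           · exact hpre x hx, hl⟩

theorem pvTakeWhile_take {α : Type} (p : α → Bool) (xs : List α) :
    xs.take (xs.takeWhile p).length = xs.takeWhile p := by
  induction xs with
  | nil => rfl
  | cons x r ih =>
    by_cases hp : p x = true
    · simp [List.takeWhile_cons, hp, ih]
    · simp [List.takeWhile_cons, hp]

-- the first stop index after offset k, as Source B's `stops[0] if stops else len`
theorem pvStops_head (base : Int) (rest : List String) : ∀ (k : Int),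
    ((((PySem.List.enumerate rest k).filter (fun p => pvStopLine base p.2)).map (·.1)) = [] ∧
      (rest.takeWhile (fun x => !pvStopLine base x)).length = rest.length) ∨
    (∃ js, (((PySem.List.enumerate rest k).filter (fun p => pvStopLine base p.2)).map (·.1))
        = (k + ((rest.takeWhile (fun x => !pvStopLine base x)).length : Int)) :: js) := by
  induction rest with
  | nil => intro k; exact Or.inl ⟨by simp [PySem.List.enumerate_nil], rfl⟩
  | cons x r ih =>
    intro k
    rw [PySem.List.enumerate_cons]
    by_cases hs : pvStopLine base x = true
    · refine Or.inr ⟨((PySem.List.enumerate r (k + 1)).filter (fun p => pvStopLine base p.2)).map (·.1), ?_⟩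
      simp [List.filter_cons, hs, List.takeWhile_cons]
    · rw [List.filter_cons]
      simp only [hs, if_neg (by simp : ¬ (false = true))]
      rw [List.takeWhile_cons]
      simp only [hs, Bool.not_false, if_true]
      rcases ih (k + 1) with ⟨h1, h2⟩ | ⟨js, h1⟩
      · exact Or.inl ⟨h1, by simp [h2]⟩
      · refine Or.inr ⟨js, ?_⟩
        rw [h1]
        congr 1
        simp only [List.length_cons]
        push_cast
        ring

theorem pvMap_takeWhile_collect (base : Int) (rest : List String) :
    (rest.takeWhile (fun x => !pvStopLine base x)).map
      (fun l => if PySem.Str.strip l == "" then "" else PySem.Str.slice l (some base) none)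
    = pvCollectB base rest := by
  induction rest with
  | nil => rfl
  | cons x r ih =>
    rw [List.takeWhile_cons, pvCollectB]
    by_cases hb : PySem.Str.strip x = ""
    · have hb' : (PySem.Str.strip x == "") = true := by simpa using hb
      have hs : pvStopLine base x = false := by simp [pvStopLine, hb']
      rw [if_pos hb, if_pos (show (!pvStopLine base x) = true by rw [hs]; rfl),
        List.map_cons, if_pos hb', ih]
    · have hb' : (PySem.Str.strip x == "") = false := by simpa using hb
      rw [if_neg hb]
      by_cases hi : PySem.Str.len x - PySem.Str.len (PySem.Str.lstrip x) ≤ base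
      · have hs : pvStopLine base x = true := by
          have h1 : decide (pvIndentB x ≤ base) = true := by
            simp only [decide_eq_true_eq, pvIndentB]; exact hi
          simp [pvStopLine, hb', h1]
        rw [if_pos hi, if_neg (show ¬ ((!pvStopLine base x) = true) by rw [hs]; simp)]
        rfl
      · have hs : pvStopLine base x = false := by
          have h1 : decide (pvIndentB x ≤ base) = false := by
            simp only [decide_eq_false_iff_not, pvIndentB]; exact hi
          simp [pvStopLine, h1]
        rw [if_neg hi, if_pos (show (!pvStopLine base x) = true by rw [hs]; rfl),
          List.map_cons, if_neg (show ¬ ((PySem.Str.strip x == "") = true) by simp [hb']), ih]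

theorem pvDefNotBlank' (l : String) (hdef : pvIsDefLine l = true) :
    (PySem.Str.strip l == "") = false := by
  have h2 : (['d','e','f',' '] : List Char) <+: l.toList.dropWhile PySem.Chars.isspace := by
    have h := hdef
    rw [pvIsDefLine, show PySem.Str.startswith (PySem.Str.lstrip l) "def "
        = PySem.Chars.startswith (l.toList.dropWhile PySem.Chars.isspace) ['d','e','f',' ']
        from by simp [PySem.Str.lstrip]; rfl] at h
    exact (PySem.Chars.startswith_iff _ _).mp h
  simp only [beq_eq_false_iff_ne, ne_eq]
  intro hb
  have hstrip : PySem.Chars.strip l.toList = [] := by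
    rw [← PySem.Str.toList_strip, hb]; rfl
  have hall : ∀ c ∈ l.toList, PySem.Chars.isspace c = true := by
    intro c hc
    have : ((l.toList.dropWhile PySem.Chars.isspace).reverse.dropWhile PySem.Chars.isspace).reverse = [] := hstrip
    rw [List.reverse_eq_nil_iff, List.dropWhile_eq_nil_iff] at this
    rw [← List.takeWhile_append_dropWhile (p := PySem.Chars.isspace) (l := l.toList)] at hc
    rcases List.mem_append.mp hc with h1 | h2
    · exact List.mem_takeWhile_imp h1
    · exact this c (List.mem_reverse.mpr h2)
  have h4 : l.toList.dropWhile PySem.Chars.isspace = [] :=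
    List.dropWhile_eq_nil_iff.mpr fun c hc => hall c hc
  rw [h4] at h2
  exact absurd (List.IsPrefix.length_le h2) (by simp)

theorem pvAltBridge (code : String) :
    extract_function_def_py_alt code = pvAltShape (pvLines code) := by
  unfold extract_function_def_py_alt pvAltShape
  cases hF : pvFindDef (pvLines code) with
  | none =>
    have hfilter : (PySem.List.enumerate (pvLines code)).filter (fun p => pvIsDefLine p.2) = [] := by
      rw [List.filter_eq_nil_iff]
      intro p hp
      obtain ⟨k, hk, hpk⟩ := (PySem.List.mem_enumerate_iff _ _ _).mp hp
      subst hpk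
      simp [pvFindDef_none _ hF _ (List.getElem_mem hk)]
    simp [hfilter]
  | some ld =>
    obtain ⟨l, rest⟩ := ld
    obtain ⟨pre, hsplit, hpre, hl⟩ := pvFindDef_some _ _ _ hF
    rw [hsplit]
    dsimp only
    -- starts
    rw [PySem.List.enumerate_append, List.filter_append, PySem.List.enumerate_cons]
    have hpreF : (PySem.List.enumerate pre 0).filter (fun p => pvIsDefLine p.2) = [] := by
      rw [List.filter_eq_nil_iff]
      intro p hp
      obtain ⟨k, hk, hpk⟩ := (PySem.List.mem_enumerate_iff _ _ _).mp hp
      subst hpk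
      simp [hpre _ (List.getElem_mem hk)]
    rw [hpreF, List.nil_append, List.filter_cons_of_pos (by simpa using hl)]
    dsimp only
    -- stops: pre part contributes nothing (indices < pre.length), nor the def line itself
    set s : Int := (0 : Int) + (pre.length : Int) with hs
    set base := pvIndentB l with hbase
    have hstopPre : (PySem.List.enumerate pre 0).filter
        (fun p => decide (s < p.1) && pvStopLine base p.2) = [] := by
      rw [List.filter_eq_nil_iff]
      intro p hp
      obtain ⟨k, hk, hpk⟩ := (PySem.List.mem_enumerate_iff _ _ _).mp hp
      subst hpk
      have h1 : ¬ s < ((0 : Int) + (k : Int) : Int) := by rw [hs]; push_cast; omega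
      have h2 : decide (s < ((0 : Int) + (k : Int) : Int)) = false := by
        simpa using h1
      rw [h2, Bool.false_and]
      exact Bool.false_ne_true
    have hself : (decide (s < s) && pvStopLine base l) = false := by simp
    rw [List.filter_append, hstopPre, List.nil_append,
        List.filter_cons_of_neg (by simp [hself])]
    -- indices in rest are all > s, so the filter reduces to pvStopLine
    have hrest : (PySem.List.enumerate rest (s + 1)).filter
        (fun p => decide (s < p.1) && pvStopLine base p.2)
        = (PySem.List.enumerate rest (s + 1)).filter (fun p => pvStopLine base p.2) := by
      apply List.filter_congr
      intro p hp
      obtain ⟨k, hk, hpk⟩ := (PySem.List.mem_enumerate_iff _ _ _).mp hp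
      subst hpk
      have h1 : decide (s < s + 1 + (k : Int)) = true := by
        simp only [decide_eq_true_eq]; omega
      simp only [h1, Bool.true_and]
    rw [hrest]
    -- e = s + 1 + (takeWhile length)
    set t := (rest.takeWhile (fun x => !pvStopLine base x)).length with ht
    -- the slice
    have hlen : ((pre ++ l :: rest).length : Int) = s + 1 + (rest.length : Int) := by
      rw [hs]; push_cast [List.length_append, List.length_cons]; omega
    have htle : t ≤ rest.length := by
      rw [ht]; exact (List.takeWhile_sublist _).length_le
    have hslice : ∀ (e : Int), e = s + 1 + (t : Int) →
        PySem.List.slice (pre ++ l :: rest) (some s) (some e)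
          = l :: rest.takeWhile (fun x => !pvStopLine base x) := by
      intro e he
      have hs' : s = (pre.length : Int) := by rw [hs]; omega
      have he' : e = ((pre.length + (1 + t) : Nat) : Int) := by push_cast; omega
      rw [hs', he', show ((pre.length + (1 + t) : Nat) : Int) = ((pre.length : Nat) : Int) + ((1 + t : Nat) : Int) by push_cast; ring]
      rw [PySem.List.slice_natCast_add, List.drop_left]
      rw [List.take_cons (by omega : 0 < 1 + t)]
      congr 1
      rw [show 1 + t - 1 = t by omega, pvTakeWhile_take]
    -- finish by cases on stops
    rcases pvStops_head base rest (s + 1) with ⟨hstops, hno⟩ | ⟨js, hstops⟩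
    · rw [hstops]
      rw [hslice ((pre ++ l :: rest).length : Int) (by rw [hlen, ← ht] at *; omega)]
      rw [List.map_cons, pvMap_takeWhile_collect]
      rw [if_neg (by simp [pvDefNotBlank' l hl] : ¬ ((PySem.Str.strip l == "") = true))]
      rfl
    · rw [hstops]
      rw [hslice (s + 1 + (t : Int)) rfl, List.map_cons, pvMap_takeWhile_collect]
      rw [if_neg (by simp [pvDefNotBlank' l hl] : ¬ ((PySem.Str.strip l == "") = true))]
      rfl

-- ==== A's loop against the characterisation (outside D_) ====

theorem pvLoopA_eq_collect (rest : List String) :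
    ∀ (base : Int) (acc : List String), pvD (some base) rest = false →
      pvLoopA rest true base acc = acc ++ pvCollectB base rest := by
  induction rest with
  | nil => intro base acc _; simp [pvLoopA, pvCollectB]
  | cons l rest ih =>
    intro base acc hreach
    simp only [pvD] at hreach
    by_cases hdef : PySem.Str.startswith (PySem.Str.lstrip l) "def " = true
    · rw [if_pos hdef] at hreach; exact absurd hreach (by simp)
    · rw [if_neg hdef] at hreach
      rw [pvLoopA, if_neg hdef, if_pos rfl, pvCollectB]
      by_cases hblank : PySem.Str.strip l = ""
      · rw [if_pos hblank, if_pos hblank]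
        have hr : pvD (some base) rest = false := by
          simpa [hblank] using hreach
        rw [ih base _ hr]; simp
      · rw [if_neg hblank, if_neg hblank]
        by_cases hind : base < PySem.Str.len l - PySem.Str.len (PySem.Str.lstrip l)
        · rw [if_pos hind, if_neg (not_le.mpr hind)]
          have hr : pvD (some base) rest = false := by
            simp at hreach
            exact hreach (Or.inr (by simpa using hind))
          rw [ih base _ hr]; simp
        · rw [if_neg hind, if_pos (not_lt.mp hind)]
          split
          · simp
          · rw [if_pos (And.intro (not_lt.mp hind) hblank)]; simp

-- before any `def ` line the loop of A (in_function = false) just skips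
theorem pvLoopA_skip (l : String) (rest : List String) (inf : Bool) (base : Int)
    (acc : List String) (hdef : ¬ PySem.Str.startswith (PySem.Str.lstrip l) "def " = true)
    (hinf : inf = false) : pvLoopA (l :: rest) inf base acc = pvLoopA rest inf base acc := by
  subst hinf
  have h2 : PySem.Chars.startswith (PySem.Chars.lstrip l.toList) (['d', 'e', 'f', ' '] : List Char) = false := by
    simpa using hdef
  simp [pvLoopA, h2]

theorem pvMain (lines : List String) : pvD none lines = false →
    (if pvLoopA lines false 0 [] = [] then none
     else some (PySem.Str.join "\n" (pvLoopA lines false 0 []))) = pvAltShape lines := by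
  induction lines with
  | nil => intro _; simp [pvLoopA, pvAltShape, pvFindDef]
  | cons l rest ih =>
    intro hD
    simp only [pvD] at hD
    by_cases hdef : PySem.Str.startswith (PySem.Str.lstrip l) "def " = true
    · rw [if_pos hdef] at hD
      have hr : pvD (some (PySem.Str.len l - PySem.Str.len (PySem.Str.lstrip l))) rest = false := by
        simpa using hD
      rw [pvAltShape, pvFindDef, if_pos hdef, pvLoopA, if_pos hdef]
      rw [pvLoopA_eq_collect rest _ _ hr]
      simp
    · rw [if_neg hdef] at hD
      rw [pvAltShape, pvFindDef, if_neg hdef, pvLoopA_skip l rest false 0 [] hdef rfl]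
      rw [← pvAltShape]
      exact ih hD

-- ==== tightness: inside D_ the two results always differ ====

-- pulling the accumulator out of A's loop
theorem pvLoopA_acc (rest : List String) : ∀ (inf : Bool) (b : Int) (acc : List String),
    pvLoopA rest inf b acc = acc ++ pvLoopA rest inf b [] := by
  induction rest with
  | nil => intro inf b acc; simp [pvLoopA]
  | cons l r ih =>
    intro inf b acc
    by_cases hdef : PySem.Str.startswith (PySem.Str.lstrip l) "def " = true
    · rw [pvLoopA, if_pos hdef, pvLoopA, if_pos hdef,
        ih true _ (acc ++ [PySem.Str.slice l (some (PySem.Str.len l - PySem.Str.len (PySem.Str.lstrip l))) none]),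
        ih true _ ([] ++ [PySem.Str.slice l (some (PySem.Str.len l - PySem.Str.len (PySem.Str.lstrip l))) none])]
      simp
    · rw [pvLoopA, if_neg hdef, pvLoopA, if_neg hdef]
      by_cases hinf : inf = true
      · rw [if_pos hinf, if_pos hinf]
        by_cases hblank : PySem.Str.strip l = ""
        · rw [if_pos hblank, if_pos hblank, ih inf b (acc ++ [""]), ih inf b ([] ++ [""])]
          simp
        · rw [if_neg hblank, if_neg hblank]
          by_cases hind : b < PySem.Str.len l - PySem.Str.len (PySem.Str.lstrip l)
          · rw [if_pos hind, if_pos hind, ih inf b (acc ++ [PySem.Str.slice l (some b) none]),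
              ih inf b ([] ++ [PySem.Str.slice l (some b) none])]
            simp
          · rw [if_neg hind, if_neg hind]
            split_ifs with h3 h4 h5
            · simp
            · simp
            · rw [ih inf b (acc ++ [PySem.Str.slice l (some b) none]),
                ih inf b ([] ++ [PySem.Str.slice l (some b) none])]
              simp
            · rw [ih inf b (acc ++ [""]), ih inf b ([] ++ [""])]
              simp
      · rw [if_neg hinf, if_neg hinf]
        exact ih inf b acc

theorem pvLstrip (l : String) :
    (PySem.Str.lstrip l).toList = l.toList.dropWhile PySem.Chars.isspace := by
  simp; rfl

theorem pvLenNonneg (l : String) : 0 ≤ PySem.Str.len l - PySem.Str.len (PySem.Str.lstrip l) := by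
  have h1 : (l.toList.dropWhile PySem.Chars.isspace).length ≤ l.toList.length :=
    (List.dropWhile_sublist _).length_le
  have h3 : PySem.Str.len l = (l.toList.length : Int) := by simp
  have h4 : PySem.Str.len (PySem.Str.lstrip l)
      = ((l.toList.dropWhile PySem.Chars.isspace).length : Int) := by rw [← pvLstrip]; simp
  omega

theorem pvNToNat (l : String) :
    (PySem.Str.len l - PySem.Str.len (PySem.Str.lstrip l)).toNat
      = (l.toList.takeWhile PySem.Chars.isspace).length := by
  have h1 : (l.toList.takeWhile PySem.Chars.isspace).length
      + (l.toList.dropWhile PySem.Chars.isspace).length = l.toList.length := by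
    rw [← List.length_append, List.takeWhile_append_dropWhile]
  have h3 : PySem.Str.len l = (l.toList.length : Int) := by simp
  have h4 : PySem.Str.len (PySem.Str.lstrip l)
      = ((l.toList.dropWhile PySem.Chars.isspace).length : Int) := by rw [← pvLstrip]; simp
  omega

theorem pvDropTake (p : Char → Bool) (l : List Char) :
    l.drop (l.takeWhile p).length = l.dropWhile p := by
  calc l.drop (l.takeWhile p).length
      = (l.takeWhile p ++ l.dropWhile p).drop (l.takeWhile p).length := by
        rw [List.takeWhile_append_dropWhile]
    _ = l.dropWhile p := List.drop_left

theorem pvSliceN (l : String) :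
    (PySem.Str.slice l (some (PySem.Str.len l - PySem.Str.len (PySem.Str.lstrip l))) none).toList
      = l.toList.dropWhile PySem.Chars.isspace := by
  rw [PySem.Str.toList_slice, PySem.Chars.slice_eq_listSlice,
      PySem.List.slice_from _ (pvLenNonneg l), pvNToNat]
  exact pvDropTake _ _

theorem pvDefDrop (l : String) (hdef : PySem.Str.startswith (PySem.Str.lstrip l) "def " = true) :
    ∃ s', l.toList.dropWhile PySem.Chars.isspace = 'd' :: 'e' :: 'f' :: ' ' :: s' := by
  have h2 : (['d', 'e', 'f', ' '] : List Char) <+: l.toList.dropWhile PySem.Chars.isspace := by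
    have h := hdef
    rw [show PySem.Str.startswith (PySem.Str.lstrip l) "def "
        = PySem.Chars.startswith (l.toList.dropWhile PySem.Chars.isspace) ['d', 'e', 'f', ' ']
        from by rw [← pvLstrip]; rfl] at h
    exact (PySem.Chars.startswith_iff _ _).mp h
  obtain ⟨s', hps⟩ := h2
  exact ⟨s', by rw [← hps]; rfl⟩

theorem pvDefHead (l : String) (hdef : PySem.Str.startswith (PySem.Str.lstrip l) "def " = true) :
    ∃ ta, (PySem.Str.slice l (some (PySem.Str.len l - PySem.Str.len (PySem.Str.lstrip l))) none).toList
      = 'd' :: ta := by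
  obtain ⟨s', hps⟩ := pvDefDrop l hdef
  exact ⟨'e' :: 'f' :: ' ' :: s', by rw [pvSliceN, hps]⟩

theorem pvStripNil (cs : List Char) :
    PySem.Chars.strip cs = [] ↔ ∀ c ∈ cs, PySem.Chars.isspace c = true := by
  show ((cs.dropWhile PySem.Chars.isspace).reverse.dropWhile PySem.Chars.isspace).reverse = [] ↔ _
  rw [List.reverse_eq_nil_iff, List.dropWhile_eq_nil_iff]
  constructor
  · intro h c hc
    rw [← List.takeWhile_append_dropWhile (p := PySem.Chars.isspace) (l := cs)] at hc
    rcases List.mem_append.mp hc with h1 | h2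
    · exact List.mem_takeWhile_imp h1
    · exact h c (List.mem_reverse.mpr h2)
  · intro h c hc
    exact h c ((List.dropWhile_sublist _).mem (List.mem_reverse.mp hc))

theorem pvDefNotBlank (l : String) (hdef : PySem.Str.startswith (PySem.Str.lstrip l) "def " = true) :
    ¬ PySem.Str.strip l = "" := by
  intro hb
  have h2 : PySem.Chars.strip l.toList = [] := by rw [← PySem.Str.toList_strip, hb]; rfl
  have h4 : l.toList.dropWhile PySem.Chars.isspace = [] :=
    List.dropWhile_eq_nil_iff.mpr fun c hc => (pvStripNil l.toList).mp h2 c hc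
  obtain ⟨s', hps⟩ := pvDefDrop l hdef
  rw [h4] at hps
  simp at hps

theorem pvSliceB (l : String) (b : Int) (hb : 0 ≤ b)
    (hlt : b < PySem.Str.len l - PySem.Str.len (PySem.Str.lstrip l)) :
    ∃ w tc, (PySem.Str.slice l (some b) none).toList = w :: tc ∧ PySem.Chars.isspace w = true := by
  have h0 : (PySem.Str.slice l (some b) none).toList = l.toList.drop b.toNat := by
    rw [PySem.Str.toList_slice, PySem.Chars.slice_eq_listSlice, PySem.List.slice_from _ hb]
  have hlen : b.toNat < (l.toList.takeWhile PySem.Chars.isspace).length := by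
    have := pvNToNat l; omega
  have hlen2 : b.toNat < l.toList.length :=
    lt_of_lt_of_le hlen (List.takeWhile_prefix _).length_le
  refine ⟨l.toList[b.toNat], l.toList.drop (b.toNat + 1), ?_, ?_⟩
  · rw [h0, List.drop_eq_getElem_cons hlen2]
  · have hg : (l.toList.takeWhile PySem.Chars.isspace)[b.toNat] = l.toList[b.toNat] :=
      (List.takeWhile_prefix _).getElem hlen
    rw [← hg]
    exact List.mem_takeWhile_imp (List.getElem_mem hlen)

theorem pvJoinSplit (s : List Char) (xs : List (List Char)) : ∀ (x : List Char) (y : List Char) (ys : List (List Char)),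
    PySem.Chars.join s ((x :: xs) ++ y :: ys)
      = PySem.Chars.join s (x :: xs) ++ s ++ PySem.Chars.join s (y :: ys) := by
  induction xs with
  | nil => intro x y ys; rw [List.cons_append, List.nil_append, PySem.Chars.join_cons_cons,
      PySem.Chars.join_singleton]
  | cons z xs ih =>
    intro x y ys
    calc PySem.Chars.join s ((x :: z :: xs) ++ y :: ys)
        = x ++ s ++ PySem.Chars.join s ((z :: xs) ++ y :: ys) :=
          PySem.Chars.join_cons_cons (sep := s) (p := x) (q := z) (rest := xs ++ y :: ys)
      _ = x ++ s ++ (PySem.Chars.join s (z :: xs) ++ s ++ PySem.Chars.join s (y :: ys)) := by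
          rw [ih z y ys]
      _ = (x ++ s ++ PySem.Chars.join s (z :: xs)) ++ s ++ PySem.Chars.join s (y :: ys) := by
          simp [List.append_assoc]
      _ = PySem.Chars.join s (x :: z :: xs) ++ s ++ PySem.Chars.join s (y :: ys) := by
          rw [PySem.Chars.join_cons_cons]

theorem pvJoinCons (s : List Char) (x : List Char) (u : List (List Char)) :
    ∃ w, PySem.Chars.join s (x :: u) = x ++ w := by
  cases u with
  | nil => exact ⟨[], by rw [PySem.Chars.join_singleton, List.append_nil]⟩
  | cons y v => exact ⟨s ++ PySem.Chars.join s (y :: v), by rw [PySem.Chars.join_cons_cons, List.append_assoc]⟩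

-- inside the change region, A's collected tail and B's diverge: A has an extra `def `-headed line
theorem pvDiv (rest : List String) : ∀ (b : Int), 0 ≤ b → pvD (some b) rest = true →
    ∃ (com : List String) (a : String) (t : List String) (ta : List Char),
      pvLoopA rest true b [] = com ++ a :: t ∧ a.toList = 'd' :: ta ∧
      (pvCollectB b rest = com ∨
        ∃ (c : String) (v : List String) (w : Char) (tc : List Char),
          pvCollectB b rest = com ++ c :: v ∧ c.toList = w :: tc ∧ PySem.Chars.isspace w = true) := by
  induction rest with
  | nil => intro b hb h; simp [pvD] at h
  | cons l r ih =>
    intro b hb h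
    simp only [pvD] at h
    by_cases hdef : PySem.Str.startswith (PySem.Str.lstrip l) "def " = true
    · obtain ⟨ta, hta⟩ := pvDefHead l hdef
      refine ⟨[], PySem.Str.slice l (some (PySem.Str.len l - PySem.Str.len (PySem.Str.lstrip l))) none,
        pvLoopA r true (PySem.Str.len l - PySem.Str.len (PySem.Str.lstrip l)) [], ta, ?_, hta, ?_⟩
      · rw [pvLoopA, if_pos hdef, pvLoopA_acc r]
        simp
      · rw [pvCollectB, if_neg (pvDefNotBlank l hdef)]
        by_cases hle : PySem.Str.len l - PySem.Str.len (PySem.Str.lstrip l) ≤ b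
        · rw [if_pos hle]
          exact Or.inl rfl
        · rw [if_neg hle]
          obtain ⟨w, tc, hc, hw⟩ := pvSliceB l b hb (by omega)
          exact Or.inr ⟨PySem.Str.slice l (some b) none, pvCollectB b r, w, tc, rfl, hc, hw⟩
    · rw [if_neg hdef] at h
      rw [Bool.and_eq_true] at h
      have hcont : pvD (some b) r = true := h.2
      have hcond := h.1
      obtain ⟨com, a, t, ta, hA, hd, hB⟩ := ih b hb hcont
      by_cases hblank : PySem.Str.strip l = ""
      · refine ⟨"" :: com, a, t, ta, ?_, hd, ?_⟩
        · rw [pvLoopA, if_neg hdef, if_pos rfl, if_pos hblank, pvLoopA_acc r, hA]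
          simp
        · rw [pvCollectB, if_pos hblank]
          rcases hB with h1 | ⟨c, v, w, tc, h1, h2, h3⟩
          · exact Or.inl (by rw [h1])
          · exact Or.inr ⟨c, v, w, tc, by rw [h1]; rfl, h2, h3⟩
      · have hind : b < PySem.Str.len l - PySem.Str.len (PySem.Str.lstrip l) := by
          have hbe : (PySem.Str.strip l == "") = false := by
            simpa using hblank
          rw [hbe, Bool.false_or] at hcond
          exact of_decide_eq_true hcond
        refine ⟨PySem.Str.slice l (some b) none :: com, a, t, ta, ?_, hd, ?_⟩
        · rw [pvLoopA, if_neg hdef, if_pos rfl, if_neg hblank, if_pos hind, pvLoopA_acc r, hA]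
          simp
        · rw [pvCollectB, if_neg hblank, if_neg (not_le.mpr hind)]
          rcases hB with h1 | ⟨c, v, w, tc, h1, h2, h3⟩
          · exact Or.inl (by rw [h1])
          · exact Or.inr ⟨c, v, w, tc, by rw [h1]; rfl, h2, h3⟩

theorem pvSepList : ("\n" : String).toList = ['\n'] := by decide

theorem pvNe1 (x : String) (com : List String) (a : String) (t : List String) :
    PySem.Str.join "\n" ((x :: com) ++ a :: t) ≠ PySem.Str.join "\n" (x :: com) := by
  intro h
  have hch := congrArg String.toList h
  rw [PySem.Str.toList_join, PySem.Str.toList_join, pvSepList, List.map_append, List.map_cons,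
      List.map_cons, pvJoinSplit] at hch
  have hlen := congrArg List.length hch
  simp [List.length_append] at hlen

theorem pvNe2 (x a c : String) (com t v : List String) (ta tc : List Char) (w : Char)
    (hd : a.toList = 'd' :: ta) (hc : c.toList = w :: tc) (hw : PySem.Chars.isspace w = true) :
    PySem.Str.join "\n" ((x :: com) ++ a :: t) ≠ PySem.Str.join "\n" ((x :: com) ++ c :: v) := by
  intro h
  have hch := congrArg String.toList h
  rw [PySem.Str.toList_join, PySem.Str.toList_join, pvSepList, List.map_append, List.map_append,
      List.map_cons, List.map_cons, List.map_cons] at hch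
  rw [pvJoinSplit, pvJoinSplit, List.append_assoc, List.append_assoc] at hch
  have h2 := List.append_cancel_left hch
  have h3 := List.append_cancel_left h2
  obtain ⟨w1, hw1⟩ := pvJoinCons ['\n'] a.toList (t.map String.toList)
  obtain ⟨w2, hw2⟩ := pvJoinCons ['\n'] c.toList (v.map String.toList)
  rw [hw1, hw2, hd, hc, List.cons_append, List.cons_append] at h3
  injection h3 with h4 h5
  rw [← h4] at hw
  exact absurd hw (by decide)

theorem pvTight (lines : List String) : pvD none lines = true →
    (if pvLoopA lines false 0 [] = [] then none
     else some (PySem.Str.join "\n" (pvLoopA lines false 0 []))) ≠ pvAltShape lines := by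
  induction lines with
  | nil => intro h; simp [pvD] at h
  | cons l rest ih =>
    intro hD
    simp only [pvD] at hD
    by_cases hdef : PySem.Str.startswith (PySem.Str.lstrip l) "def " = true
    · rw [if_pos hdef] at hD
      have hsome : pvD (some (PySem.Str.len l - PySem.Str.len (PySem.Str.lstrip l))) rest = true := by
        simpa using hD
      obtain ⟨com, a, t, ta, hA, hd, hB⟩ := pvDiv rest _ (pvLenNonneg l) hsome
      rw [pvAltShape, pvFindDef, if_pos hdef, pvLoopA, if_pos hdef, pvLoopA_acc rest, hA,
        if_neg (show ¬ ([] ++ [PySem.Str.slice l (some (PySem.Str.len l - PySem.Str.len (PySem.Str.lstrip l))) none])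
            ++ (com ++ a :: t) = [] by simp)]
      intro heq
      have hstr := Option.some.inj heq
      have hL : (([] ++ [PySem.Str.slice l (some (PySem.Str.len l - PySem.Str.len (PySem.Str.lstrip l))) none])
          ++ (com ++ a :: t))
          = (PySem.Str.slice l (some (PySem.Str.len l - PySem.Str.len (PySem.Str.lstrip l))) none :: com)
            ++ a :: t := by simp
      rw [hL] at hstr
      rcases hB with h1 | ⟨c, v, w, tc, h1, h2, h3⟩
      · rw [h1] at hstr
        exact pvNe1 _ com a t hstr
      · rw [h1] at hstr
        have hL2 : (PySem.Str.slice l (some (PySem.Str.len l - PySem.Str.len (PySem.Str.lstrip l))) none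
            :: (com ++ c :: v))
            = (PySem.Str.slice l (some (PySem.Str.len l - PySem.Str.len (PySem.Str.lstrip l))) none :: com)
              ++ c :: v := by simp
        rw [hL2] at hstr
        exact pvNe2 _ a c com t v ta tc w hd h2 h3 hstr
    · rw [if_neg hdef] at hD
      rw [pvAltShape, pvFindDef, if_neg hdef, pvLoopA_skip l rest false 0 [] hdef rfl, ← pvAltShape]
      exact ih hD

-- ===== VERDICT =====
theorem extract_function_def_py_spec : Claim_unchanged_extract_function_def_py := by
  intro code _
  unfold Spec_extract_function_def_py
  intro hnD
  rw [pvAltBridge]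
  unfold extract_function_def_py
  apply pvMain
  unfold D_extract_function_def_py at hnD
  exact Bool.not_eq_true _ ▸ (Bool.eq_false_iff.mpr (fun h => hnD h))

theorem extract_function_def_py_changed : Claim_changed_extract_function_def_py := by
  unfold Claim_changed_extract_function_def_py; decide

theorem extract_function_def_py_tight : Claim_exact_extract_function_def_py := by
  intro code _ hD
  rw [Ne, pvAltBridge]
  unfold extract_function_def_py
  exact pvTight (pvLines code) hD
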